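-- pv_equiv track=rewrite | github.com/Ves5/AdventOfCode2023 | day13/day13.py | check_pattern_for_mirror_line
-- ===== SOURCE A (Python) =====
-- def check_pattern_for_mirror_line(rows, columns):
--     # check every between line for a mirror image in rows
--     r_count = 0
--     for i in range(1, len(rows)):
--         mirror = True
--         for j in range(min(i, len(rows) - i)):
--             if rows[i - j - 1] != rows[i + j]:
--                 mirror = False
--                 break
--         r_count += i if mirror else 0
--     # check every between line for a mirror image in columns
--     c_count = 0
--     for i in range(1, len(columns)):
--         mirror = True
--         for j in range(min(i, len(columns) - i)):
--             if columns[i - j - 1] != columns[i + j]: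
--                 mirror = False
--                 break
--         c_count += i if mirror else 0
--
--     return r_count, c_count
-- ===== SOURCE B (Python) =====
-- def check_pattern_for_mirror_line(rows, columns):
--     # Walk the list once, maintaining the reversed prefix; a split at i is a
--     # mirror iff the reversed prefix and the remaining suffix agree elementwise.
--     def total(xs):
--         s = 0
--         rev = []
--         rest = list(xs)
--         i = 0
--         while rest:
--             rev = [rest[0]] + rev
--             rest = rest[1:]
--             i += 1
--             if rest and all(a == b for a, b in zip(rev, rest)):
--                 s += i
--         return s
--     return total(rows), total(columns)
-- ===== Notes on version B (the rewrite author's own statement) =====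
-- stated objective: alternative
-- what changed: B replaces A's index arithmetic (for each split, an inner loop over rows[i-j-1] vs rows[i+j] with break) by a single forward walk that maintains the reversed prefix and tests each split by zipping it against the remaining suffix.
import Mathlib
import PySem

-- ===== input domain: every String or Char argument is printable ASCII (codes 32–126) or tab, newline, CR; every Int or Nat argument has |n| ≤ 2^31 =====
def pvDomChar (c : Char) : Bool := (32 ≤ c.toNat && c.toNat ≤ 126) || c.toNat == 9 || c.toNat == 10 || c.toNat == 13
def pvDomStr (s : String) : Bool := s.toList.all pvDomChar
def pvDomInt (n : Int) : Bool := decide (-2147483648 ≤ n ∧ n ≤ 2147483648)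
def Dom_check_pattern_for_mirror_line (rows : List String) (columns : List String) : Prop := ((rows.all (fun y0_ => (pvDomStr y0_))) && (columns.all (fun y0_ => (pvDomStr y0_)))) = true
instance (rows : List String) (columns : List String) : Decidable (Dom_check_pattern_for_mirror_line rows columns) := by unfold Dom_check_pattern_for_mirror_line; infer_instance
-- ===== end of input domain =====

-- B is an alternative decomposition: it walks the list once keeping the reversed prefix and
-- tests each split by zipping it against the suffix, instead of A's per-split inner index loop.

-- ===== PORT A =====
-- inner 'for j in range(min(i, len-i))' loop with break; c is the number of iterations left
def aInner (xs : List String) (i : Nat) : Nat → Nat → Bool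
  | _, 0 => true
  | j, c+1 =>
      if xs.getD (i - j - 1) "" ≠ xs.getD (i + j) "" then false
      else aInner xs i (j+1) c

def aMirror (xs : List String) (i : Nat) : Bool := aInner xs i 0 (min i (xs.length - i))

-- 'for i in range(1, len(xs)): count += i if mirror else 0'
def aTotal (xs : List String) : Nat :=
  (List.range' 1 (xs.length - 1)).foldl (fun acc i => acc + (if aMirror xs i then i else 0)) 0

def check_pattern_for_mirror_line (rows : List String) (columns : List String) : Int × Int :=
  ((aTotal rows : Int), (aTotal columns : Int))

-- ===== PORT B =====
def allEq (l : List (String × String)) : Bool := l.all (fun p => p.1 == p.2)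

-- the while loop: rev = reversed prefix, rest = suffix, i = split position reached
def bGo (rev : List String) (rest : List String) (i : Nat) : Nat :=
  match rest with
  | [] => 0
  | x :: rest' =>
      (if rest' ≠ [] ∧ allEq ((x :: rev).zip rest') then i + 1 else 0) + bGo (x :: rev) rest' (i+1)

def bTotal (xs : List String) : Nat := bGo [] xs 0

def check_pattern_for_mirror_line_alt (rows : List String) (columns : List String) : Int × Int :=
  ((bTotal rows : Int), (bTotal columns : Int))

-- ===== PRECONDITION & SPEC =====
def Spec_check_pattern_for_mirror_line (rows : List String) (columns : List String) (out : Int × Int) : Prop := out = check_pattern_for_mirror_line_alt rows columns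
instance (rows : List String) (columns : List String) (out : Int × Int) : Decidable (Spec_check_pattern_for_mirror_line rows columns out) := by unfold Spec_check_pattern_for_mirror_line; infer_instance

-- ===== CLAIM (what is proved, stated in full; the proofs are below) =====
def Claim_equal_check_pattern_for_mirror_line : Prop := ∀ (rows : List String) (columns : List String), Dom_check_pattern_for_mirror_line rows columns → Spec_check_pattern_for_mirror_line rows columns (check_pattern_for_mirror_line rows columns)

-- ===== LEMMAS AND PROOFS =====

lemma aInner_iff (xs : List String) (i : Nat) :
    ∀ (c j : Nat), aInner xs i j c = true ↔
      ∀ k, k < c → xs.getD (i - (j + k) - 1) "" = xs.getD (i + (j + k)) "" := by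
  intro c
  induction c with
  | zero => intro j; simp [aInner]
  | succ c ih =>
      intro j
      rw [aInner]
      by_cases h : xs.getD (i - j - 1) "" = xs.getD (i + j) ""
      · rw [if_neg (fun hne => hne h), ih (j+1)]
        constructor
        · intro H k hk
          cases k with
          | zero => simpa using h
          | succ k =>
              have := H k (by omega)
              have e1 : j + 1 + k = j + (k + 1) := by omega
              rwa [e1] at this
        · intro H k hk
          have := H (k+1) (by omega)
          have e1 : j + (k + 1) = j + 1 + k := by omega
          rwa [e1] at this
      · rw [if_pos (by simpa using h)]
        constructor
        · intro H; exact absurd H (by simp)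
        · intro H
          exact absurd (by simpa using H 0 (by omega)) h

lemma allEq_iff (a b : List String) :
    allEq (a.zip b) = true ↔
      ∀ k (h : k < min a.length b.length), a[k] = b[k] := by
  unfold allEq
  rw [List.all_eq_true]
  constructor
  · intro H k hk
    have hk1 : k < (a.zip b).length := by simpa [List.length_zip] using hk
    have := H _ (List.getElem_mem hk1)
    simpa [List.getElem_zip] using this
  · intro H p hp
    obtain ⟨k, hk, rfl⟩ := List.mem_iff_getElem.mp hp
    have hk' : k < min a.length b.length := by simpa [List.length_zip] using hk
    simpa [List.getElem_zip] using H k hk'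

lemma mirror_eq (xs : List String) (i : Nat) (h1 : i ≤ xs.length) :
    aMirror xs i = allEq (((xs.take i).reverse).zip (xs.drop i)) := by
  rw [Bool.eq_iff_iff]
  unfold aMirror
  rw [aInner_iff, allEq_iff]
  have hlen : (xs.take i).reverse.length = i := by simp [Nat.min_eq_left h1]
  have hdlen : (xs.drop i).length = xs.length - i := by simp
  constructor
  · intro H k hk
    rw [hlen, hdlen] at hk
    have hk1 : i - k - 1 < xs.length := by omega
    have hk2 : i + k < xs.length := by omega
    have := H k (by simpa using hk)
    simp only [Nat.zero_add] at this
    rw [List.getD_eq_getElem _ _ hk1, List.getD_eq_getElem _ _ hk2] at this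
    have e1 : (xs.take i).reverse[k] = xs[i - k - 1] := by
      rw [List.getElem_reverse, List.getElem_take]
      congr 1
      simp only [List.length_take]
      omega
    have e2 : (xs.drop i)[k] = xs[i + k] := by
      rw [List.getElem_drop]
    rw [e1, e2]
    exact this
  · intro H k hk
    simp only [Nat.zero_add]
    have hk' : k < min (xs.take i).reverse.length (xs.drop i).length := by
      rw [hlen, hdlen]; simpa using hk
    have := H k hk'
    have hk1 : i - k - 1 < xs.length := by omega
    have hk2 : i + k < xs.length := by omega
    rw [List.getD_eq_getElem _ _ hk1, List.getD_eq_getElem _ _ hk2]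
    have e1 : (xs.take i).reverse[k] = xs[i - k - 1] := by
      rw [List.getElem_reverse, List.getElem_take]
      congr 1
      simp only [List.length_take]
      omega
    have e2 : (xs.drop i)[k] = xs[i + k] := by
      rw [List.getElem_drop]
    rw [e1, e2] at this
    exact this

lemma bGo_eq (xs : List String) :
    ∀ (rest rev : List String) (i : Nat),
      rev = (xs.take i).reverse → rest = xs.drop i →
      bGo rev rest i =
        ((List.range' (i+1) (xs.length - 1 - i)).map
          (fun j => if allEq (((xs.take j).reverse).zip (xs.drop j)) then j else 0)).sum := by
  intro rest
  induction rest with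
  | nil =>
      intro rev i hrev hrest
      have hn : xs.length ≤ i := List.drop_eq_nil_iff.mp hrest.symm
      have : xs.length - 1 - i = 0 := by omega
      simp [bGo, this]
  | cons x rest' ih =>
      intro rev i hrev hrest
      have hi : i < xs.length := by
        by_contra h
        have hd : xs.drop i = [] := List.drop_eq_nil_of_le (by omega)
        rw [hd] at hrest
        exact (List.cons_ne_nil _ _) hrest
      have hx : x :: rest' = xs[i] :: xs.drop (i+1) := by
        rw [hrest]; exact List.drop_eq_getElem_cons hi
      have hxe : x = xs[i] := by injection hx
      have hrest' : rest' = xs.drop (i+1) := by injection hx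
      have hrev' : x :: rev = (List.take (i+1) xs).reverse := by
        rw [hrev, hxe, List.take_add_one, List.getElem?_eq_getElem hi,
            Option.toList_some, List.reverse_append, List.reverse_singleton,
            List.singleton_append]
      rw [bGo, ih (x :: rev) (i+1) hrev' hrest']
      by_cases hlast : i + 1 < xs.length
      · have hm : xs.length - 1 - i = (xs.length - 1 - (i+1)) + 1 := by omega
        rw [hm, List.range'_succ, List.map_cons, List.sum_cons]
        congr 1
        have hne : List.drop (i+1) xs ≠ [] := by
          simp only [ne_eq, List.drop_eq_nil_iff]
          omega
        rw [hrev', hrest']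
        simp only [ne_eq, hne, not_false_eq_true, true_and]
      · have hnil : rest' = [] := by
          rw [hrest']; exact List.drop_eq_nil_of_le (by omega)
        have hz1 : xs.length - 1 - i = 0 := by omega
        have hz2 : xs.length - 1 - (i+1) = 0 := by omega
        rw [hz1, hz2]
        simp [hnil]

lemma foldl_add_eq_sum (f : Nat → Nat) :
    ∀ (l : List Nat) (a : Nat), l.foldl (fun acc i => acc + f i) a = a + (l.map f).sum := by
  intro l
  induction l with
  | nil => simp
  | cons x t ih => intro a; simp [List.foldl_cons, ih, Nat.add_assoc]

lemma total_eq (xs : List String) : aTotal xs = bTotal xs := by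
  unfold aTotal bTotal
  rw [foldl_add_eq_sum, Nat.zero_add,
      bGo_eq xs xs [] 0 (by simp) (by simp)]
  congr 1
  apply List.map_congr_left
  intro j hj
  have hj' := List.mem_range'.mp hj
  have h1 : 1 ≤ j := by omega
  have h2 : j ≤ xs.length := by omega
  rw [mirror_eq xs j h2]

-- ===== VERDICT (by name: the statement is the Claim_ definition above) =====
theorem check_pattern_for_mirror_line_spec : Claim_equal_check_pattern_for_mirror_line := by
  intro rows columns _
  unfold Spec_check_pattern_for_mirror_line check_pattern_for_mirror_line check_pattern_for_mirror_line_alt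
  rw [total_eq, total_eq]
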